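-- pv_equiv track=rewrite | github.com/pandesanskruti/python-programs | The_Stern_Brocot_Number_System.py | stern_brocot_representation
-- ===== SOURCE A (Python) =====
-- def stern_brocot_representation(m, n):
--     representation = ""
--     while m != 1 or n != 1:
--         if m < n:
--             representation += "L"
--             n -= m
--         else:
--             representation += "R"
--             m -= n
--     return representation
-- ===== SOURCE B (Python) =====
-- def stern_brocot_representation(m, n):
--     if m == n:
--         return ""
--     if m < n:
--         q = (n - 1) // m
--         return "L" * q + stern_brocot_representation(m, n - q * m)
--     q = (m - 1) // n
--     return "R" * q + stern_brocot_representation(m - q * n, n)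
-- ===== Notes on version B (the rewrite author's own statement) =====
-- stated objective: alternative
-- what changed: Replaces A's one-subtraction-one-character while-loop (string +=) by a recursion that computes each continued-fraction quotient with integer division and emits it as one repeated-character block.
import Mathlib
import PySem

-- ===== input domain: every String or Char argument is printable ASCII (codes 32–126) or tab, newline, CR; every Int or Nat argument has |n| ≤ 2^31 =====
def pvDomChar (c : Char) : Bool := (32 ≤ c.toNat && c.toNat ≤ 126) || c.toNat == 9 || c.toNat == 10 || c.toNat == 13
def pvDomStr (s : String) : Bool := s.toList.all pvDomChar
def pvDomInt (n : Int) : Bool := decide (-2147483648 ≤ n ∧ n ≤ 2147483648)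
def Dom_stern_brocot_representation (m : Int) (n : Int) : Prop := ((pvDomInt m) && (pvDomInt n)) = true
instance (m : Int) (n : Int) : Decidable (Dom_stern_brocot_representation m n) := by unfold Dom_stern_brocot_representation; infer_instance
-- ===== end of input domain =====

-- B replaces A's one-subtraction-one-character loop by a recursion that computes each
-- continued-fraction quotient with // and emits it as one repeated-character block
-- (objective: alternative algorithm; equal return value on all positive coprime inputs).

-- ===== PORT A =====
-- A's while-loop as a tail recursion over the same state (m, n, accumulated string as a
-- character list).  The fuel (m + n).toNat only totalises the recursion: on Pre_ each
-- iteration lowers m + n by at least 1, so the fuel is never exhausted; outside Pre_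
-- the Python loop diverges.
def sternALoop : Nat → Int → Int → List Char → List Char
  | 0, _, _, acc => acc
  | fuel + 1, m, n, acc =>
    if m ≠ 1 ∨ n ≠ 1 then
      if m < n then sternALoop fuel m (n - m) (acc ++ ['L'])
      else sternALoop fuel (m - n) n (acc ++ ['R'])
    else acc

def stern_brocot_representation (m : Int) (n : Int) : String :=
  String.ofList (sternALoop (m + n).toNat m n [])

-- ===== PORT B =====
-- Source B's recursion, step for step; "X" * q is PySem.List.pyRepeat ['X'] q.  The same
-- fuel (m + n).toNat totalises it (on Pre_ each division step also lowers m + n;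
-- outside Pre_ Source B divides by zero or recurses forever).
def sternBRec : Nat → Int → Int → List Char
  | 0, _, _ => []
  | fuel + 1, m, n =>
    if m = n then []
    else if m < n then
      let q := PySem.Int.floordiv (n - 1) m
      PySem.List.pyRepeat ['L'] q ++ sternBRec fuel m (n - q * m)
    else
      let q := PySem.Int.floordiv (m - 1) n
      PySem.List.pyRepeat ['R'] q ++ sternBRec fuel (m - q * n) n

def stern_brocot_representation_alt (m : Int) (n : Int) : String :=
  String.ofList (sternBRec (m + n).toNat m n)

-- ===== PRECONDITION & SPEC =====
-- Exactly the inputs on which A's while-loop terminates: both arguments positive and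
-- coprime (otherwise the subtraction loop never reaches the terminating state where both
-- variables equal one, and the Python function diverges, returning nothing).
def Pre_stern_brocot_representation (m : Int) (n : Int) : Prop :=
  1 ≤ m ∧ 1 ≤ n ∧ Int.gcd m n = 1
instance (m : Int) (n : Int) : Decidable (Pre_stern_brocot_representation m n) := by
  unfold Pre_stern_brocot_representation; infer_instance

def pvWitness_stern_brocot_representation : Int × Int := (3, 5)

def Spec_stern_brocot_representation (m : Int) (n : Int) (out : String) : Prop := out = stern_brocot_representation_alt m n
instance (m : Int) (n : Int) (out : String) : Decidable (Spec_stern_brocot_representation m n out) := by unfold Spec_stern_brocot_representation; infer_instance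

-- ===== CLAIM (what is proved, stated in full; the proofs are below) =====
def Claim_equal_stern_brocot_representation : Prop := ∀ (m : Int) (n : Int), Dom_stern_brocot_representation m n → Pre_stern_brocot_representation m n → Spec_stern_brocot_representation m n (stern_brocot_representation m n)

-- ===== LEMMAS AND PROOFS =====

-- The quotient B takes on the L side: at least one step, remainder in [1, m].
theorem qL_facts (m n : Int) (hm : 1 ≤ m) (hlt : m < n) :
    1 ≤ PySem.Int.floordiv (n - 1) m ∧
    1 ≤ n - PySem.Int.floordiv (n - 1) m * m ∧
    n - PySem.Int.floordiv (n - 1) m * m ≤ m := by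
  have hmpos : (0 : Int) < m := by omega
  have hbr := (PySem.Int.floordiv_eq_iff_of_pos (a := n - 1) (b := m) hmpos).mp rfl
  have hq1 : 1 ≤ PySem.Int.floordiv (n - 1) m :=
    (PySem.Int.le_floordiv_iff_mul_le hmpos).mpr (by omega)
  have h2 := hbr.2
  rw [add_mul, one_mul] at h2
  exact ⟨hq1, by omega, by omega⟩

-- The quotient B takes on the R side (mirror image).
theorem qR_facts (m n : Int) (hn : 1 ≤ n) (hlt : n < m) :
    1 ≤ PySem.Int.floordiv (m - 1) n ∧
    1 ≤ m - PySem.Int.floordiv (m - 1) n * n ∧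
    m - PySem.Int.floordiv (m - 1) n * n ≤ n := by
  have hnpos : (0 : Int) < n := by omega
  have hbr := (PySem.Int.floordiv_eq_iff_of_pos (a := m - 1) (b := n) hnpos).mp rfl
  have hq1 : 1 ≤ PySem.Int.floordiv (m - 1) n :=
    (PySem.Int.le_floordiv_iff_mul_le hnpos).mpr (by omega)
  have h2 := hbr.2
  rw [add_mul, one_mul] at h2
  exact ⟨hq1, by omega, by omega⟩

-- B's result does not depend on the fuel once the fuel is sufficient.
theorem sternBRec_fuel (f : Nat) : ∀ (g : Nat) (m n : Int), 1 ≤ m → 1 ≤ n →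
    (m + n).toNat ≤ f + 1 → (m + n).toNat ≤ g + 1 →
    sternBRec f m n = sternBRec g m n := by
  induction f with
  | zero => intro g m n hm hn hf _; exfalso; omega
  | succ f ih =>
    intro g m n hm hn hf hg
    match g with
    | 0 => exfalso; omega
    | g + 1 =>
      by_cases hmn : m = n
      · simp [sternBRec, hmn]
      · rcases lt_or_gt_of_ne hmn with hlt | hlt
        · obtain ⟨hq1, hr1, hr2⟩ := qL_facts m n hm hlt
          have hqm : 1 ≤ PySem.Int.floordiv (n - 1) m * m := by
            have := mul_le_mul hq1 hm (by omega) (by omega)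
            simpa using this
          simp only [sternBRec, if_neg hmn, if_pos hlt]
          rw [ih g m (n - PySem.Int.floordiv (n - 1) m * m) hm hr1 (by omega) (by omega)]
        · obtain ⟨hq1, hr1, hr2⟩ := qR_facts m n hn hlt
          have hqn : 1 ≤ PySem.Int.floordiv (m - 1) n * n := by
            have := mul_le_mul hq1 hn (by omega) (by omega)
            simpa using this
          simp only [sternBRec, if_neg hmn, if_neg (show ¬ m < n by omega)]
          rw [ih g (m - PySem.Int.floordiv (m - 1) n * n) n hr1 hn (by omega) (by omega)]

-- One subtraction step of B on the L side: peeling a single 'L' off B's q-sized block.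
theorem sternBRec_L_step (f : Nat) (m n : Int) (hm : 1 ≤ m) (hlt : m < n)
    (hf : (m + n).toNat ≤ f + 2) :
    sternBRec (f + 1) m n = 'L' :: sternBRec f m (n - m) := by
  have hmpos : (0 : Int) < m := by omega
  have hbr := (PySem.Int.floordiv_eq_iff_of_pos (a := n - 1) (b := m) hmpos).mp rfl
  obtain ⟨hq1, hr1, hr2⟩ := qL_facts m n hm hlt
  set q := PySem.Int.floordiv (n - 1) m with hqdef
  simp only [sternBRec, if_neg (show ¬ m = n by omega), if_pos hlt, ← hqdef]
  rcases eq_or_lt_of_le hq1 with hq | hq2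
  · -- q = 1 : the block is a single 'L' and the tails coincide
    rw [← hq]
    simp [PySem.List.pyRepeat_singleton]
  · -- q ≥ 2 : B at (m, n - m) produces the block of q - 1 'L's with the same tail
    have h2m : 2 * m ≤ n - 1 := by nlinarith [hbr.1]
    have hlt' : m < n - m := by omega
    match f with
    | 0 => exfalso; omega
    | f + 1 =>
      have hq' : PySem.Int.floordiv (n - m - 1) m = q - 1 := by
        rw [PySem.Int.floordiv_eq_iff_of_pos hmpos]
        constructor <;> nlinarith [hbr.1, hbr.2]
      conv_rhs => rw [sternBRec]
      simp only [if_neg (show ¬ m = n - m by omega), if_pos hlt', hq']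
      have harg : n - m - (q - 1) * m = n - q * m := by ring
      rw [harg]
      rw [sternBRec_fuel f (f + 1) m (n - q * m) hm hr1 (by omega) (by omega)]
      simp only [PySem.List.pyRepeat_singleton]
      rw [← List.cons_append]
      congr 1
      have : q.toNat = (q - 1).toNat + 1 := by omega
      rw [this, List.replicate_succ]

-- One subtraction step of B on the R side (mirror image).
theorem sternBRec_R_step (f : Nat) (m n : Int) (hn : 1 ≤ n) (hlt : n < m)
    (hf : (m + n).toNat ≤ f + 2) :
    sternBRec (f + 1) m n = 'R' :: sternBRec f (m - n) n := by
  have hnpos : (0 : Int) < n := by omega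
  have hbr := (PySem.Int.floordiv_eq_iff_of_pos (a := m - 1) (b := n) hnpos).mp rfl
  obtain ⟨hq1, hr1, hr2⟩ := qR_facts m n hn hlt
  set q := PySem.Int.floordiv (m - 1) n with hqdef
  simp only [sternBRec, if_neg (show ¬ m = n by omega), if_neg (show ¬ m < n by omega), ← hqdef]
  rcases eq_or_lt_of_le hq1 with hq | hq2
  · rw [← hq]
    simp [PySem.List.pyRepeat_singleton]
  · have h2n : 2 * n ≤ m - 1 := by nlinarith [hbr.1]
    have hlt' : n < m - n := by omega
    match f with
    | 0 => exfalso; omega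
    | f + 1 =>
      have hq' : PySem.Int.floordiv (m - n - 1) n = q - 1 := by
        rw [PySem.Int.floordiv_eq_iff_of_pos hnpos]
        constructor <;> nlinarith [hbr.1, hbr.2]
      conv_rhs => rw [sternBRec]
      simp only [if_neg (show ¬ m - n = n by omega), if_neg (show ¬ m - n < n by omega), hq']
      have harg : m - n - (q - 1) * n = m - q * n := by ring
      rw [harg]
      rw [sternBRec_fuel f (f + 1) (m - q * n) n hr1 hn (by omega) (by omega)]
      simp only [PySem.List.pyRepeat_singleton]
      rw [← List.cons_append]
      congr 1
      have : q.toNat = (q - 1).toNat + 1 := by omega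
      rw [this, List.replicate_succ]

-- The accumulator of A's loop only collects output on the left.
theorem sternALoop_acc (f : Nat) : ∀ (m n : Int) (acc : List Char),
    sternALoop f m n acc = acc ++ sternALoop f m n [] := by
  induction f with
  | zero => intro m n acc; simp [sternALoop]
  | succ f ih =>
    intro m n acc
    by_cases hc : m ≠ 1 ∨ n ≠ 1
    · by_cases hlt : m < n
      · simp only [sternALoop, if_pos hc, if_pos hlt]
        rw [ih m (n - m) (acc ++ ['L']), ih m (n - m) ([] ++ ['L'])]
        simp
      · simp only [sternALoop, if_pos hc, if_neg hlt]
        rw [ih (m - n) n (acc ++ ['R']), ih (m - n) n ([] ++ ['R'])]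
        simp
    · simp [sternALoop, hc]

theorem gcd_sub_right (m n : Int) : Int.gcd m (n - m) = Int.gcd m n := by
  have h := Int.gcd_add_mul_left_right m (n - m) 1
  simp only [mul_one, sub_add_cancel] at h
  exact h.symm

theorem gcd_sub_left (m n : Int) : Int.gcd (m - n) n = Int.gcd m n := by
  rw [Int.gcd_comm, Int.gcd_comm m n]
  have h := Int.gcd_add_mul_left_right n (m - n) 1
  simp only [mul_one, sub_add_cancel] at h
  exact h.symm

-- A and B produce the same character list on positive coprime inputs, for any
-- sufficient fuel (induction on the fuel; one subtraction step of A matches one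
-- peeled step of B).
theorem sternAB (f : Nat) : ∀ m n : Int, 1 ≤ m → 1 ≤ n → Int.gcd m n = 1 →
    (m + n).toNat ≤ f + 1 → sternALoop f m n [] = sternBRec f m n := by
  induction f with
  | zero => intro m n hm hn _ hf; exfalso; omega
  | succ f ih =>
    intro m n hm hn hg hf
    by_cases hmn : m = n
    · -- coprime and equal forces m = n = 1; both sides are empty
      subst hmn
      have habs : Int.gcd m m = m.natAbs := by simp [Int.gcd, Nat.gcd_self]
      have hm1 : m = 1 := by omega
      simp [sternALoop, sternBRec, hm1]
    · rcases lt_or_gt_of_ne hmn with hlt | hlt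
      · -- m < n : A emits one 'L' and subtracts; B's block loses one 'L'
        simp only [sternALoop, if_pos (show m ≠ 1 ∨ n ≠ 1 by omega), if_pos hlt]
        rw [sternALoop_acc f m (n - m) ([] ++ ['L'])]
        rw [sternBRec_L_step f m n hm hlt (by omega)]
        rw [ih m (n - m) hm (by omega) (by rw [gcd_sub_right]; exact hg) (by omega)]
        simp
      · -- n < m : symmetric
        simp only [sternALoop, if_pos (show m ≠ 1 ∨ n ≠ 1 by omega),
          if_neg (show ¬ m < n by omega)]
        rw [sternALoop_acc f (m - n) n ([] ++ ['R'])]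
        rw [sternBRec_R_step f m n hn hlt (by omega)]
        rw [ih (m - n) n (by omega) hn (by rw [gcd_sub_left]; exact hg) (by omega)]
        simp

-- ===== VERDICT (by name: the statement is the Claim_ definition above) =====
theorem stern_brocot_representation_spec : Claim_equal_stern_brocot_representation := by
  intro m n _ hpre
  unfold Spec_stern_brocot_representation stern_brocot_representation stern_brocot_representation_alt
  obtain ⟨hm, hn, hg⟩ := hpre
  rw [sternAB (m + n).toNat m n hm hn hg (by omega)]
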